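-- pv_equiv track=rewrite | github.com/Trivenidigital/gecko-alpha | scout/trading/cohort_digest.py | _build_final_block
-- ===== SOURCE A (Python) =====
-- def _build_final_block(
--     current_verdicts: dict[str, dict]
-- ) -> list[str]:
--     """V28 SHOULD-FIX final-window decision-recommendation block.
--     Softened wording — BL-055 live-trading is the gating dependency."""
--     by_label: dict[str, list[str]] = {
--         "strong-pattern (exploratory)": [],
--         "moderate": [],
--         "tracking": [],
--         "near-identical": [],
--     }
--     for signal_type, info in current_verdicts.items():
--         v = info["verdict"]
--         if v.startswith("INSUFFICIENT_DATA"):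
--             continue
--         by_label.setdefault(v, []).append(signal_type)
--     out = ["", "=== 4-week decision point (2026-06-08 anchor) ==="]
--     if by_label["strong-pattern (exploratory)"]:
--         out.append(
--             "Strong-pattern signals (exploratory): "
--             + ", ".join(by_label["strong-pattern (exploratory)"])
--         )
--         out.append(
--             "  → Recommend operator review for live-promotion candidacy."
--         )
--         out.append(
--             "    (BL-055 live-trading unlock is the gating dependency; "
--             "this is a pre-approval signal, not an auto-promote.)"
--         )
--     if by_label["moderate"]:
--         out.append("Moderate signals: " + ", ".join(by_label["moderate"]))
--         out.append(
--             "  → Continue paper soak; re-evaluate at +4w."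
--         )
--     if by_label["tracking"]:
--         out.append("Tracking signals: " + ", ".join(by_label["tracking"]))
--         out.append("  → No regime change observed. Continue as-is.")
--     if by_label["near-identical"]:
--         out.append(
--             "Near-identical / Excluded: "
--             + ", ".join(by_label["near-identical"])
--         )
--         out.append("  → Structural — verdict not informative.")
--     return out
-- ===== SOURCE B (Python) =====
-- def _build_final_block(
--     current_verdicts: dict[str, dict]
-- ) -> list[str]:
--     """Table-driven rewrite: one ordered config table of (label, header, follow-up
--     lines); per label, scan the verdicts for exact matches.  No grouping dict."""
--     table = [
--         ("strong-pattern (exploratory)",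
--          "Strong-pattern signals (exploratory): ",
--          ["  → Recommend operator review for live-promotion candidacy.",
--           "    (BL-055 live-trading unlock is the gating dependency; "
--           "this is a pre-approval signal, not an auto-promote.)"]),
--         ("moderate",
--          "Moderate signals: ",
--          ["  → Continue paper soak; re-evaluate at +4w."]),
--         ("tracking",
--          "Tracking signals: ",
--          ["  → No regime change observed. Continue as-is."]),
--         ("near-identical",
--          "Near-identical / Excluded: ",
--          ["  → Structural — verdict not informative."]),
--     ]
--     out = ["", "=== 4-week decision point (2026-06-08 anchor) ==="]
--     for label, header, follow in table:
--         names = [s for s, info in current_verdicts.items()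
--                  if info["verdict"] == label]
--         if names:
--             out.append(header + ", ".join(names))
--             out.extend(follow)
--     return out
-- ===== Notes on version B (the rewrite author's own statement) =====
-- stated objective: alternative
-- what changed: Replaces A's grouping-dict pass (setdefault/append) plus four hard-coded if-blocks with a single ordered config table of (label, header, follow-up lines) driven by a per-label scan of the verdicts; the INSUFFICIENT_DATA skip disappears because only exact label matches are collected.
import Mathlib
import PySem

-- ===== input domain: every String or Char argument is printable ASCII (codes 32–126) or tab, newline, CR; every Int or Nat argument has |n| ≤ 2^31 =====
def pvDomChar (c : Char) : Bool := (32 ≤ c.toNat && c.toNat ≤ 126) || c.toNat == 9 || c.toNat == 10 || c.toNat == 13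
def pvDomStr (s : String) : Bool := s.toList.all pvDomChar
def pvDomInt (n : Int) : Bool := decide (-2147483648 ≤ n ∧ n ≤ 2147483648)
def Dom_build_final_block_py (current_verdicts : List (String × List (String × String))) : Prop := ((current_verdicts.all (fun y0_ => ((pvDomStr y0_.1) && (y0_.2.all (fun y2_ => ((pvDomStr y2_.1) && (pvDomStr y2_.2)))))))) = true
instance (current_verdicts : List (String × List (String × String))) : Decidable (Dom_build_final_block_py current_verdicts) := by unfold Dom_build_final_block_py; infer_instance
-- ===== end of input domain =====

-- B replaces A's grouping dict + four hard-coded if-blocks by a config table scanned per label; same output.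

-- ===== PORT A =====
-- the loop body: v = info["verdict"]; skip INSUFFICIENT_DATA*; by_label.setdefault(v, []).append(signal_type)
def afbStep (d : PySem.Dict String (List String)) (p : String × List (String × String)) : PySem.Dict String (List String) :=
  match (PySem.Dict.mk p.2).get? "verdict" with
  | none => d   -- Python raises KeyError here; excluded by Pre_
  | some v =>
    if PySem.Str.startswith v "INSUFFICIENT_DATA" then d
    else d.modify v [] (· ++ [p.1])   -- setdefault(v, []).append(signal_type)

def build_final_block_py (current_verdicts : List (String × List (String × String))) : List String :=
  let d0 : PySem.Dict String (List String) :=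
    PySem.Dict.ofList [("strong-pattern (exploratory)", []), ("moderate", []), ("tracking", []), ("near-identical", [])]
  let d := current_verdicts.foldl afbStep d0
  let out : List String := ["", "=== 4-week decision point (2026-06-08 anchor) ==="]
  let out := if d.getD "strong-pattern (exploratory)" [] ≠ [] then
      out ++ ["Strong-pattern signals (exploratory): " ++ PySem.Str.join ", " (d.getD "strong-pattern (exploratory)" []),
              "  → Recommend operator review for live-promotion candidacy.",
              "    (BL-055 live-trading unlock is the gating dependency; this is a pre-approval signal, not an auto-promote.)"]
    else out
  let out := if d.getD "moderate" [] ≠ [] then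
      out ++ ["Moderate signals: " ++ PySem.Str.join ", " (d.getD "moderate" []),
              "  → Continue paper soak; re-evaluate at +4w."]
    else out
  let out := if d.getD "tracking" [] ≠ [] then
      out ++ ["Tracking signals: " ++ PySem.Str.join ", " (d.getD "tracking" []),
              "  → No regime change observed. Continue as-is."]
    else out
  let out := if d.getD "near-identical" [] ≠ [] then
      out ++ ["Near-identical / Excluded: " ++ PySem.Str.join ", " (d.getD "near-identical" []),
              "  → Structural — verdict not informative."]
    else out
  out

-- ===== PORT B =====
-- ordered config table: (label, header prefix, follow-up lines)
def bfbTable : List (String × String × List String) :=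
  [("strong-pattern (exploratory)", "Strong-pattern signals (exploratory): ",
    ["  → Recommend operator review for live-promotion candidacy.",
     "    (BL-055 live-trading unlock is the gating dependency; this is a pre-approval signal, not an auto-promote.)"]),
   ("moderate", "Moderate signals: ",
    ["  → Continue paper soak; re-evaluate at +4w."]),
   ("tracking", "Tracking signals: ",
    ["  → No regime change observed. Continue as-is."]),
   ("near-identical", "Near-identical / Excluded: ",
    ["  → Structural — verdict not informative."])]

def build_final_block_py_alt (current_verdicts : List (String × List (String × String))) : List String :=
  bfbTable.foldl (fun out e =>
    let names := (current_verdicts.filter (fun p => (PySem.Dict.mk p.2).getD "verdict" "" == e.1)).map Prod.fst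
    if names ≠ [] then out ++ [e.2.1 ++ PySem.Str.join ", " names] ++ e.2.2 else out)
    ["", "=== 4-week decision point (2026-06-08 anchor) ==="]

-- ===== PRECONDITION & SPEC =====
-- Pre_ excludes exactly the inputs where some info dict lacks the "verdict" key, on which A raises KeyError.
def Pre_build_final_block_py (current_verdicts : List (String × List (String × String))) : Prop :=
  ∀ p ∈ current_verdicts, ((PySem.Dict.mk p.2).get? "verdict").isSome = true
instance (current_verdicts : List (String × List (String × String))) : Decidable (Pre_build_final_block_py current_verdicts) := by unfold Pre_build_final_block_py; infer_instance

def pvWitness_build_final_block_py : (List (String × List (String × String))) :=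
  [("sig_a", [("verdict", "moderate")]), ("sig_b", [("verdict", "INSUFFICIENT_DATA")])]

def Spec_build_final_block_py (current_verdicts : List (String × List (String × String))) (out : List String) : Prop := out = build_final_block_py_alt current_verdicts
instance (current_verdicts : List (String × List (String × String))) (out : List String) : Decidable (Spec_build_final_block_py current_verdicts out) := by unfold Spec_build_final_block_py; infer_instance

-- ===== CLAIM (what is proved, stated in full; the proofs are below) =====
def Claim_equal_build_final_block_py : Prop := ∀ (current_verdicts : List (String × List (String × String))), Dom_build_final_block_py current_verdicts → Pre_build_final_block_py current_verdicts → Spec_build_final_block_py current_verdicts (build_final_block_py current_verdicts)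

-- ===== LEMMAS AND PROOFS =====

-- the grouping loop computes, at any fixed non-INSUFFICIENT label L, exactly B's per-label scan
lemma afb_loop_getD (xs : List (String × List (String × String))) (d : PySem.Dict String (List String))
    (L : String) (hL : PySem.Str.startswith L "INSUFFICIENT_DATA" = false)
    (hpre : ∀ p ∈ xs, ((PySem.Dict.mk p.2).get? "verdict").isSome = true) :
    (xs.foldl afbStep d).getD L []
      = d.getD L [] ++ (xs.filter (fun p => (PySem.Dict.mk p.2).getD "verdict" "" == L)).map Prod.fst := by
  induction xs generalizing d with
  | nil => simp
  | cons p t ih =>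
    have hp := hpre p (by simp)
    obtain ⟨v, hv⟩ : ∃ v, (PySem.Dict.mk p.2).get? "verdict" = some v := by
      cases h : (PySem.Dict.mk p.2).get? "verdict" with
      | none => rw [h] at hp; simp at hp
      | some v => exact ⟨v, rfl⟩
    have hgetD : (PySem.Dict.mk p.2).getD "verdict" "" = v := by
      simp [PySem.Dict.getD_eq_get?_getD, hv]
    have ht : ∀ q ∈ t, ((PySem.Dict.mk q.2).get? "verdict").isSome = true :=
      fun q hq => hpre q (by simp [hq])
    simp only [List.foldl_cons, List.filter_cons]
    have hmatch : afbStep d p = if PySem.Str.startswith v "INSUFFICIENT_DATA" then d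
        else d.modify v [] (· ++ [p.1]) := by
      unfold afbStep; rw [hv]
    by_cases hstart : PySem.Str.startswith v "INSUFFICIENT_DATA" = true
    · have hne : (v == L) = false := by
        apply beq_eq_false_iff_ne.mpr
        intro h; subst h; rw [hstart] at hL; exact absurd hL (by decide)
      rw [hmatch, if_pos hstart, hgetD, hne]
      simp [ih d ht]
    · rw [hmatch, if_neg hstart, hgetD, ih _ ht, PySem.Dict.getD_modify]
      by_cases hvL : v = L
      · subst hvL; simp
      · have : (v == L) = false := by simp [hvL]
        rw [this]
        simp [Ne.symm hvL]

-- ===== VERDICT (by name: the statement is the Claim_ definition above) =====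
theorem build_final_block_py_spec : Claim_equal_build_final_block_py := by
  intro cv _ hpre
  have h1 := afb_loop_getD cv (PySem.Dict.ofList [("strong-pattern (exploratory)", []), ("moderate", []), ("tracking", []), ("near-identical", [])]) "strong-pattern (exploratory)" (by decide) hpre
  have h2 := afb_loop_getD cv (PySem.Dict.ofList [("strong-pattern (exploratory)", []), ("moderate", []), ("tracking", []), ("near-identical", [])]) "moderate" (by decide) hpre
  have h3 := afb_loop_getD cv (PySem.Dict.ofList [("strong-pattern (exploratory)", []), ("moderate", []), ("tracking", []), ("near-identical", [])]) "tracking" (by decide) hpre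
  have h4 := afb_loop_getD cv (PySem.Dict.ofList [("strong-pattern (exploratory)", []), ("moderate", []), ("tracking", []), ("near-identical", [])]) "near-identical" (by decide) hpre
  rw [show (PySem.Dict.ofList [("strong-pattern (exploratory)", ([] : List String)), ("moderate", []), ("tracking", []), ("near-identical", [])]).getD "strong-pattern (exploratory)" [] = [] from by decide] at h1
  rw [show (PySem.Dict.ofList [("strong-pattern (exploratory)", ([] : List String)), ("moderate", []), ("tracking", []), ("near-identical", [])]).getD "moderate" [] = [] from by decide] at h2
  rw [show (PySem.Dict.ofList [("strong-pattern (exploratory)", ([] : List String)), ("moderate", []), ("tracking", []), ("near-identical", [])]).getD "tracking" [] = [] from by decide] at h3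
  rw [show (PySem.Dict.ofList [("strong-pattern (exploratory)", ([] : List String)), ("moderate", []), ("tracking", []), ("near-identical", [])]).getD "near-identical" [] = [] from by decide] at h4
  simp only [List.nil_append] at h1 h2 h3 h4
  simp only [Spec_build_final_block_py, build_final_block_py, build_final_block_py_alt, bfbTable,
    List.foldl_cons, List.foldl_nil, h1, h2, h3, h4, List.append_assoc, List.cons_append,
    List.nil_append]
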